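-- pv_equiv track=rewrite | github.com/kelvinhuang0327/number-pattern-research | lottery_api/models/enhanced_predictor.py | _evaluate_constraints
-- ===== SOURCE A (Python) =====
-- from typing import List, Dict, Tuple, Set
--
-- def _evaluate_constraints(numbers: List[int], history: List[Dict]) -> float:
--     """評估約束條件滿足程度"""
--     score = 0
--
--     # 1. 奇偶比約束 (4:2 或 3:3 最佳)
--     odd_count = sum(1 for n in numbers if n % 2 == 1)
--     if odd_count in [3, 4]:
--         score += 20
--     elif odd_count in [2, 5]:
--         score += 10
--
--     # 2. 和值約束 (128-173 最佳)
--     total_sum = sum(numbers)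
--     if 128 <= total_sum <= 173:
--         score += 20
--     elif 100 <= total_sum <= 200:
--         score += 10
--
--     # 3. 區間分佈約束
--     zones = [(1, 10), (11, 20), (21, 30), (31, 40), (41, 49)]
--     zone_counts = []
--     for z_min, z_max in zones:
--         count = sum(1 for n in numbers if z_min <= n <= z_max)
--         zone_counts.append(count)
--
--     # 理想分佈：每個區間 1-2 個
--     good_zones = sum(1 for c in zone_counts if 1 <= c <= 2)
--     score += good_zones * 4
--
--     # 4. 連號約束 - 允許 1-2 個上期號碼
--     if history:
--         last_nums = set(history[0]['numbers'])
--         overlap = len(set(numbers) & last_nums)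
--         if overlap in [1, 2]:
--             score += 15
--
--     return score
-- ===== SOURCE B (Python) =====
-- def _evaluate_constraints(numbers, history):
--     """Single-pass tally (odd count, sum, zone buckets), then threshold scoring."""
--     odd_count = 0
--     total_sum = 0
--     zone_counts = [0, 0, 0, 0, 0]
--     for n in numbers:
--         if n % 2 == 1:
--             odd_count += 1
--         total_sum += n
--         if 1 <= n <= 49:
--             zone_counts[(n - 1) // 10] += 1
--
--     score = 0
--     if odd_count in (3, 4):
--         score += 20
--     elif odd_count in (2, 5):
--         score += 10
--
--     if 128 <= total_sum <= 173:
--         score += 20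
--     elif 100 <= total_sum <= 200:
--         score += 10
--
--     score += 4 * sum(1 for c in zone_counts if 1 <= c <= 2)
--
--     if history:
--         last = history[0]['numbers']
--         overlap = sum(1 for x in set(numbers) if x in last)
--         if overlap in (1, 2):
--             score += 15
--     return score
-- ===== Notes on version B (the rewrite author's own statement) =====
-- stated objective: alternative
-- what changed: Replaces the per-zone rescans (5 zones x n numbers) and the separate odd/sum generator passes with one linear pass that tallies odd_count, total_sum and a 5-slot zone bucket array via (n-1)//10, guarded by 1<=n<=49; the threshold scoring is then applied to the tallies.
import Mathlib
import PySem

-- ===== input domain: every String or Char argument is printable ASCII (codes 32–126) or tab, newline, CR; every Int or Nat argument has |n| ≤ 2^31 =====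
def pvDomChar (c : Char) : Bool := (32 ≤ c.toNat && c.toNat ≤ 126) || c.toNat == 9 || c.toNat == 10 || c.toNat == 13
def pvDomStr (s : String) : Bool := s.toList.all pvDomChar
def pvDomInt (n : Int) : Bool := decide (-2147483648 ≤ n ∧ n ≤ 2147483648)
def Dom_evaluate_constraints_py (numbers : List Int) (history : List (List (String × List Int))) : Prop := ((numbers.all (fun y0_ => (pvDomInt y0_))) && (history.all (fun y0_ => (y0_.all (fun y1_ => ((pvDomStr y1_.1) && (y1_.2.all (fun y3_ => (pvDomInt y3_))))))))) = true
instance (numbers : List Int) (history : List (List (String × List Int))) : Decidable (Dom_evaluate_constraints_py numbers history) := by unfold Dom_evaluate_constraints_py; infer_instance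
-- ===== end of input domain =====

-- B replaces A's seven separate passes (odd generator, sum, five per-zone rescans) by one
-- linear tallying pass bucketing each 1..49 number by (n-1)//10; same threshold scoring after.

-- ===== PORT A =====
def evaluate_constraints_py (numbers : List Int) (history : List (List (String × List Int))) : Int :=
  let score : Int := 0
  let odd_count : Int := (numbers.countP (fun n => PySem.Int.mod n 2 == 1) : Int)
  let score := if odd_count = 3 ∨ odd_count = 4 then score + 20
               else if odd_count = 2 ∨ odd_count = 5 then score + 10 else score
  let total_sum : Int := numbers.sum
  let score := if 128 ≤ total_sum ∧ total_sum ≤ 173 then score + 20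
               else if 100 ≤ total_sum ∧ total_sum ≤ 200 then score + 10 else score
  let zones : List (Int × Int) := [(1,10),(11,20),(21,30),(31,40),(41,49)]
  let zone_counts : List Int :=
    zones.foldl (fun acc z => acc ++ [((numbers.countP (fun n => decide (z.1 ≤ n ∧ n ≤ z.2))) : Int)]) []
  let good_zones : Int := ((zone_counts.countP (fun c => decide (1 ≤ c ∧ c ≤ 2))) : Int)
  let score := score + good_zones * 4
  match history with
  | [] => score
  | h0 :: _ =>
      -- history[0]['numbers']: first-match lookup; total via getD, Pre_ guarantees the key exists
      let last_nums : PySem.Set Int := PySem.Set.ofList ((PySem.Dict.mk h0).getD "numbers" [])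
      let overlap : Int := ((PySem.Set.inter (PySem.Set.ofList numbers) last_nums).length : Int)
      if overlap = 1 ∨ overlap = 2 then score + 15 else score

-- ===== PORT B =====
def pvTallyLoop : List Int → Int × Int × List Int → Int × Int × List Int
  | [], st => st
  | n :: rest, (o, s, z) =>
      let o' := if PySem.Int.mod n 2 == 1 then o + 1 else o
      let s' := s + n
      let z' := if 1 ≤ n ∧ n ≤ 49 then
          PySem.List.pySetD z (PySem.Int.floordiv (n - 1) 10)
            (PySem.List.pyGetD z (PySem.Int.floordiv (n - 1) 10) 0 + 1)
        else z
      pvTallyLoop rest (o', s', z')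

def evaluate_constraints_py_alt (numbers : List Int) (history : List (List (String × List Int))) : Int :=
  let t := pvTallyLoop numbers (0, 0, [0, 0, 0, 0, 0])
  let odd_count := t.1
  let total_sum := t.2.1
  let zone_counts := t.2.2
  let score : Int := 0
  let score := if odd_count = 3 ∨ odd_count = 4 then score + 20
               else if odd_count = 2 ∨ odd_count = 5 then score + 10 else score
  let score := if 128 ≤ total_sum ∧ total_sum ≤ 173 then score + 20
               else if 100 ≤ total_sum ∧ total_sum ≤ 200 then score + 10 else score
  let score := score + 4 * ((zone_counts.countP (fun c => decide (1 ≤ c ∧ c ≤ 2))) : Int)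
  match history with
  | [] => score
  | h0 :: _ =>
      let last : List Int := (PySem.Dict.mk h0).getD "numbers" []
      let overlap : Int := (((PySem.Set.ofList numbers).countP (fun x => last.contains x)) : Int)
      if overlap = 1 ∨ overlap = 2 then score + 15 else score

-- ===== PRECONDITION & SPEC =====
-- Pre_ excludes a nonempty history whose first record has no "numbers" key: there A (and B) raise KeyError.
def Pre_evaluate_constraints_py (numbers : List Int) (history : List (List (String × List Int))) : Prop :=
  (history.head?.all (fun h0 => ((PySem.Dict.mk h0).get? "numbers").isSome)) = true
instance (numbers : List Int) (history : List (List (String × List Int))) : Decidable (Pre_evaluate_constraints_py numbers history) := by unfold Pre_evaluate_constraints_py; infer_instance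

def pvWitness_evaluate_constraints_py : List Int × (List (List (String × List Int))) :=
  ([1, 12, 23, 34, 45, 6], [[("numbers", [1, 2, 3, 4, 5, 6])]])

def Spec_evaluate_constraints_py (numbers : List Int) (history : List (List (String × List Int))) (out : Int) : Prop := out = evaluate_constraints_py_alt numbers history
instance (numbers : List Int) (history : List (List (String × List Int))) (out : Int) : Decidable (Spec_evaluate_constraints_py numbers history out) := by unfold Spec_evaluate_constraints_py; infer_instance

-- ===== CLAIM (what is proved, stated in full; the proofs are below) =====
def Claim_equal_evaluate_constraints_py : Prop := ∀ (numbers : List Int) (history : List (List (String × List Int))), Dom_evaluate_constraints_py numbers history → Pre_evaluate_constraints_py numbers history → Spec_evaluate_constraints_py numbers history (evaluate_constraints_py numbers history)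

-- ===== LEMMAS AND PROOFS =====

lemma pvTallyLoop_eq (l : List Int) (o s a b c d e : Int) :
    pvTallyLoop l (o, s, [a, b, c, d, e]) =
      (o + (l.countP (fun n => PySem.Int.mod n 2 == 1) : Int),
       s + l.sum,
       [a + (l.countP (fun n => decide (1 ≤ n ∧ n ≤ 10)) : Int),
        b + (l.countP (fun n => decide (11 ≤ n ∧ n ≤ 20)) : Int),
        c + (l.countP (fun n => decide (21 ≤ n ∧ n ≤ 30)) : Int),
        d + (l.countP (fun n => decide (31 ≤ n ∧ n ≤ 40)) : Int),
        e + (l.countP (fun n => decide (41 ≤ n ∧ n ≤ 49)) : Int)]) := by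
  induction l generalizing o s a b c d e with
  | nil => simp [pvTallyLoop]
  | cons n rest ih =>
      simp only [pvTallyLoop]
      by_cases h49 : 1 ≤ n ∧ n ≤ 49
      · rw [if_pos h49]
        by_cases h0 : n ≤ 10
        · have hq : PySem.Int.floordiv (n - 1) 10 = 0 := by
            rw [PySem.Int.floordiv_eq_iff_of_pos (by norm_num)]; omega
          rw [hq]
          simp only [show PySem.List.pySetD [a,b,c,d,e] 0 (PySem.List.pyGetD [a,b,c,d,e] 0 0 + 1) = [a+1,b,c,d,e] from rfl]
          rw [ih]
          simp only [List.countP_cons, List.sum_cons, Prod.mk.injEq, List.cons.injEq]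
          and_intros <;> push_cast <;> (try split_ifs) <;> (try simp only [decide_eq_true_eq] at *) <;> omega
        by_cases h1 : n ≤ 20
        · have hq : PySem.Int.floordiv (n - 1) 10 = 1 := by
            rw [PySem.Int.floordiv_eq_iff_of_pos (by norm_num)]; omega
          rw [hq]
          simp only [show PySem.List.pySetD [a,b,c,d,e] 1 (PySem.List.pyGetD [a,b,c,d,e] 1 0 + 1) = [a,b+1,c,d,e] from rfl]
          rw [ih]
          simp only [List.countP_cons, List.sum_cons, Prod.mk.injEq, List.cons.injEq]
          and_intros <;> push_cast <;> (try split_ifs) <;> (try simp only [decide_eq_true_eq] at *) <;> omega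
        by_cases h2 : n ≤ 30
        · have hq : PySem.Int.floordiv (n - 1) 10 = 2 := by
            rw [PySem.Int.floordiv_eq_iff_of_pos (by norm_num)]; omega
          rw [hq]
          simp only [show PySem.List.pySetD [a,b,c,d,e] 2 (PySem.List.pyGetD [a,b,c,d,e] 2 0 + 1) = [a,b,c+1,d,e] from rfl]
          rw [ih]
          simp only [List.countP_cons, List.sum_cons, Prod.mk.injEq, List.cons.injEq]
          and_intros <;> push_cast <;> (try split_ifs) <;> (try simp only [decide_eq_true_eq] at *) <;> omega
        by_cases h3 : n ≤ 40
        · have hq : PySem.Int.floordiv (n - 1) 10 = 3 := by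
            rw [PySem.Int.floordiv_eq_iff_of_pos (by norm_num)]; omega
          rw [hq]
          simp only [show PySem.List.pySetD [a,b,c,d,e] 3 (PySem.List.pyGetD [a,b,c,d,e] 3 0 + 1) = [a,b,c,d+1,e] from rfl]
          rw [ih]
          simp only [List.countP_cons, List.sum_cons, Prod.mk.injEq, List.cons.injEq]
          and_intros <;> push_cast <;> (try split_ifs) <;> (try simp only [decide_eq_true_eq] at *) <;> omega
        · have hq : PySem.Int.floordiv (n - 1) 10 = 4 := by
            rw [PySem.Int.floordiv_eq_iff_of_pos (by norm_num)]; omega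
          rw [hq]
          simp only [show PySem.List.pySetD [a,b,c,d,e] 4 (PySem.List.pyGetD [a,b,c,d,e] 4 0 + 1) = [a,b,c,d,e+1] from rfl]
          rw [ih]
          simp only [List.countP_cons, List.sum_cons, Prod.mk.injEq, List.cons.injEq]
          and_intros <;> push_cast <;> (try split_ifs) <;> (try simp only [decide_eq_true_eq] at *) <;> omega
      · rw [if_neg h49, ih]
        simp only [List.countP_cons, List.sum_cons, Prod.mk.injEq, List.cons.injEq]
        and_intros <;> push_cast <;> (try split_ifs) <;> (try simp only [decide_eq_true_eq] at *) <;> omega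

lemma pvInterLen (xs ys : List Int) :
    (PySem.Set.inter (PySem.Set.ofList xs) (PySem.Set.ofList ys)).length =
    (PySem.Set.ofList xs).countP (fun x => ys.contains x) := by
  simp [PySem.Set.inter, List.countP_eq_length_filter]

theorem evaluate_constraints_py_spec : Claim_equal_evaluate_constraints_py := by
  intro numbers history _hdom _hpre
  unfold Spec_evaluate_constraints_py evaluate_constraints_py evaluate_constraints_py_alt
  rw [pvTallyLoop_eq]
  cases history with
  | nil => simp [List.foldl, mul_comm]
  | cons h0 t => simp [List.foldl, mul_comm, pvInterLen]
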